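-- pv_equiv track=rewrite | github.com/masayukitanaka/CVTakeHome | programs7/pdf_insurance_analyzer.py | consolidate_buildings
-- ===== SOURCE A (Python) =====
-- def consolidate_buildings(all_buildings):
--     """Consolidate buildings from multiple pages to avoid duplicates"""
--     consolidated = {}
--
--     for building in all_buildings:
--         # Use location_building as key for consolidation
--         key = building.get('location_building', '')
--
--         if key in consolidated:
--             # Merge information, preferring non-empty values
--             existing = consolidated[key]
--             merged = {}
--
--             for field in ['location_building', 'address', 'building_limit',
--                         'personal_property_limit', 'business_income', 'deductible', 'valuation']:
--                 existing_val = existing.get(field, '')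
--                 new_val = building.get(field, '')
--
--                 # Prefer non-empty values, or longer values if both non-empty
--                 if not existing_val:
--                     merged[field] = new_val
--                 elif not new_val:
--                     merged[field] = existing_val
--                 else:
--                     # Both have values, prefer longer/more detailed one
--                     merged[field] = new_val if len(new_val) > len(existing_val) else existing_val
--
--             consolidated[key] = merged
--         else:
--             consolidated[key] = building
--
--     return list(consolidated.values())
-- ===== SOURCE B (Python) =====
-- FIELDS = ['location_building', 'address', 'building_limit',
--           'personal_property_limit', 'business_income', 'deductible', 'valuation']
--
--
-- def _merge(existing, building):
--     merged = {}
--     for field in FIELDS: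
--         existing_val = existing.get(field, '')
--         new_val = building.get(field, '')
--         if not existing_val:
--             merged[field] = new_val
--         elif not new_val:
--             merged[field] = existing_val
--         else:
--             merged[field] = new_val if len(new_val) > len(existing_val) else existing_val
--     return merged
--
--
-- def consolidate_buildings(all_buildings):
--     """Group buildings by key in one pass, then fold the per-field merge over each group."""
--     groups = {}
--     for building in all_buildings:
--         key = building.get('location_building', '')
--         if key in groups:
--             groups[key] = groups[key] + [building]
--         else:
--             groups[key] = [building]
--
--     result = []
--     for group in groups.values():
--         first, *rest = group
--         merged = first
--         for building in rest:
--             merged = _merge(merged, building)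
--         result.append(merged)
--     return result
-- ===== Notes on version B (the rewrite author's own statement) =====
-- stated objective: alternative
-- what changed: B replaces A's incremental merge-into-the-dict loop by a two-phase decomposition: one pass groups the buildings into an order-preserving dict of lists keyed by location_building, then each group is folded with a standalone per-field merge function (singleton groups emit the original dict unchanged).
import Mathlib
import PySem

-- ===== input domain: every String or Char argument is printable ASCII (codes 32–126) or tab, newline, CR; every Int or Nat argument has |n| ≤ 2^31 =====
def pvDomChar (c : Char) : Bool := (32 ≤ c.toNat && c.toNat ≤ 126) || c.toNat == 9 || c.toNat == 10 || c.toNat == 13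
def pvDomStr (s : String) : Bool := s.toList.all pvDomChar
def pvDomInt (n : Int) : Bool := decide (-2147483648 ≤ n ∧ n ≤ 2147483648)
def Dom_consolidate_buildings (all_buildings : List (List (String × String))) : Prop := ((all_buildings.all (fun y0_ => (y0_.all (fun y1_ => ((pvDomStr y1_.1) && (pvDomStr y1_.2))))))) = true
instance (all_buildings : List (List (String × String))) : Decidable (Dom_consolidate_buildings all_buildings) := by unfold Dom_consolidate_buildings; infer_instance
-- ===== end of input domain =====

-- B regroups the input by key in one pass and then folds the per-field merge over each group
-- (same return value as A's incremental in-dict merging; objective: alternative decomposition).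

-- ===== PORT A =====
def cbFields : List String :=
  ["location_building", "address", "building_limit",
   "personal_property_limit", "business_income", "deductible", "valuation"]

def consolidate_buildings (all_buildings : List (List (String × String))) : List (List (String × String)) :=
  (all_buildings.foldl (fun consolidated building =>
      let key := (PySem.Dict.mk building).getD "location_building" ""
      match consolidated.get? key with
      | some existing =>
          let merged := cbFields.foldl (fun m field =>
              let existing_val := (PySem.Dict.mk existing).getD field ""
              let new_val := (PySem.Dict.mk building).getD field ""
              m.insert field
                (if existing_val = "" then new_val
                 else if new_val = "" then existing_val
                 else if PySem.Str.len new_val > PySem.Str.len existing_val then new_val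
                 else existing_val)) PySem.Dict.empty
          consolidated.insert key merged.items
      | none => consolidated.insert key building)
    (PySem.Dict.empty : PySem.Dict String (List (String × String)))).values

-- ===== PORT B =====
-- Source B's _merge helper
def cbMerge (existing building : List (String × String)) : List (String × String) :=
  (cbFields.foldl (fun m field =>
      let existing_val := (PySem.Dict.mk existing).getD field ""
      let new_val := (PySem.Dict.mk building).getD field ""
      m.insert field
        (if existing_val = "" then new_val
         else if new_val = "" then existing_val
         else if PySem.Str.len new_val > PySem.Str.len existing_val then new_val
         else existing_val)) PySem.Dict.empty).items

-- Source B's inner 'first, *rest = group; fold _merge over rest' loop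
def cbReduce (group : List (List (String × String))) : List (String × String) :=
  match group with
  | [] => []
  | first :: rest => rest.foldl cbMerge first

def consolidate_buildings_alt (all_buildings : List (List (String × String))) : List (List (String × String)) :=
  let groups := all_buildings.foldl (fun groups building =>
      let key := (PySem.Dict.mk building).getD "location_building" ""
      match groups.get? key with
      | some g => groups.insert key (g ++ [building])
      | none => groups.insert key [building])
    (PySem.Dict.empty : PySem.Dict String (List (List (String × String))))
  groups.values.map cbReduce

-- ===== PRECONDITION & SPEC =====
def Spec_consolidate_buildings (all_buildings : List (List (String × String))) (out : List (List (String × String))) : Prop := out = consolidate_buildings_alt all_buildings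
instance (all_buildings : List (List (String × String))) (out : List (List (String × String))) : Decidable (Spec_consolidate_buildings all_buildings out) := by unfold Spec_consolidate_buildings; infer_instance

-- ===== CLAIM (what is proved, stated in full; the proofs are below) =====
def Claim_equal_consolidate_buildings : Prop := ∀ (all_buildings : List (List (String × String))), Dom_consolidate_buildings all_buildings → Spec_consolidate_buildings all_buildings (consolidate_buildings all_buildings)

-- ===== LEMMAS AND PROOFS =====

-- map cbReduce over the values of a group dict, as a Dict
def cbMapRed (d : PySem.Dict String (List (List (String × String)))) : PySem.Dict String (List (String × String)) :=
  PySem.Dict.mk (d.items.map (fun kv => (kv.1, cbReduce kv.2)))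

lemma cbMapRed_keys (d : PySem.Dict String (List (List (String × String)))) :
    (cbMapRed d).keys = d.keys := by
  simp [cbMapRed, PySem.Dict.keys]

lemma cbMapRed_get? (d : PySem.Dict String (List (List (String × String)))) (k : String) :
    (cbMapRed d).get? k = (d.get? k).map cbReduce := by
  obtain ⟨items⟩ := d
  induction items with
  | nil => simp [cbMapRed, PySem.Dict.get?]
  | cons kv rest ih =>
    have h1 : cbMapRed ⟨kv :: rest⟩
        = PySem.Dict.mk ((kv.1, cbReduce kv.2) :: rest.map (fun kv => (kv.1, cbReduce kv.2))) := rfl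
    rw [h1, PySem.Dict.get?_mk_cons, PySem.Dict.get?_mk_cons]
    by_cases h : (kv.1 == k) = true
    · simp [h]
    · simp only [h]
      exact ih

lemma cbMapRed_contains (d : PySem.Dict String (List (List (String × String)))) (k : String) :
    (cbMapRed d).contains k = d.contains k := by
  rw [PySem.Dict.contains_eq_decide_mem_keys, PySem.Dict.contains_eq_decide_mem_keys, cbMapRed_keys]

lemma cbMapRed_insert (d : PySem.Dict String (List (List (String × String)))) (k : String)
    (v : List (List (String × String))) :
    cbMapRed (d.insert k v) = (cbMapRed d).insert k (cbReduce v) := by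
  apply PySem.Dict.ext
  show (PySem.Dict.items (d.insert k v)).map _ = _
  rw [PySem.Dict.items_insert, PySem.Dict.items_insert, cbMapRed_contains]
  by_cases h : d.contains k = true
  · rw [if_pos h, if_pos h]
    show _ = (d.items.map _).map _
    rw [List.map_map, List.map_map]
    apply List.map_congr_left
    intro p _
    by_cases hp : p.1 = k <;> simp [hp]
  · rw [if_neg h, if_neg h, List.map_append]
    rfl

lemma cbReduce_concat (g : List (List (String × String))) (b : List (String × String)) (hg : g ≠ []) :
    cbReduce (g ++ [b]) = cbMerge (cbReduce g) b := by
  obtain ⟨h, t, rfl⟩ := List.exists_cons_of_ne_nil hg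
  simp [cbReduce, List.foldl_append]

-- the two accumulation loops agree, provided every group already stored is nonempty
lemma cb_loop (bs : List (List (String × String)))
    (d : PySem.Dict String (List (List (String × String))))
    (hd : ∀ kv ∈ d.items, kv.2 ≠ []) :
    bs.foldl (fun consolidated building =>
      let key := (PySem.Dict.mk building).getD "location_building" ""
      match consolidated.get? key with
      | some existing =>
          let merged := cbFields.foldl (fun m field =>
              let existing_val := (PySem.Dict.mk existing).getD field ""
              let new_val := (PySem.Dict.mk building).getD field ""
              m.insert field
                (if existing_val = "" then new_val
                 else if new_val = "" then existing_val
                 else if PySem.Str.len new_val > PySem.Str.len existing_val then new_val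
                 else existing_val)) PySem.Dict.empty
          consolidated.insert key merged.items
      | none => consolidated.insert key building) (cbMapRed d)
    = cbMapRed (bs.foldl (fun groups building =>
      let key := (PySem.Dict.mk building).getD "location_building" ""
      match groups.get? key with
      | some g => groups.insert key (g ++ [building])
      | none => groups.insert key [building]) d) := by
  induction bs generalizing d with
  | nil => rfl
  | cons b bs ih =>
    simp only [List.foldl_cons]
    set key := (PySem.Dict.mk b).getD "location_building" "" with hkey
    rcases hget : d.get? key with _ | g
    · rw [cbMapRed_get?, hget]
      show bs.foldl _ ((cbMapRed d).insert key b) = _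
      have : (cbMapRed d).insert key b = cbMapRed (d.insert key [b]) := by
        rw [cbMapRed_insert]; rfl
      rw [this, ih]
      intro kv hkv
      rcases (PySem.Dict.mem_items_insert d key [b] kv).1 hkv with h | h
      · subst h; simp
      · exact hd kv h.1
    · rw [cbMapRed_get?, hget]
      show bs.foldl _ ((cbMapRed d).insert key (cbMerge (cbReduce g) b)) = _
      have hgne : g ≠ [] := hd (key, g) (PySem.Dict.mem_items_of_get?_eq_some d hget)
      have : (cbMapRed d).insert key (cbMerge (cbReduce g) b)
           = cbMapRed (d.insert key (g ++ [b])) := by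
        rw [cbMapRed_insert, cbReduce_concat g b hgne]
      rw [this, ih]
      intro kv hkv
      rcases (PySem.Dict.mem_items_insert d key (g ++ [b]) kv).1 hkv with h | h
      · subst h; simp
      · exact hd kv h.1

lemma cbMapRed_values (d : PySem.Dict String (List (List (String × String)))) :
    (cbMapRed d).values = d.values.map cbReduce := by
  simp [cbMapRed, PySem.Dict.values]

-- ===== VERDICT (by name: the statement is the Claim_ definition above) =====
theorem consolidate_buildings_spec : Claim_equal_consolidate_buildings := by
  intro all_buildings _
  show consolidate_buildings all_buildings = consolidate_buildings_alt all_buildings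
  unfold consolidate_buildings consolidate_buildings_alt
  have := cb_loop all_buildings PySem.Dict.empty (by intro kv hkv; simp [PySem.Dict.empty] at hkv)
  have hempty : (PySem.Dict.empty : PySem.Dict String (List (String × String))) = cbMapRed PySem.Dict.empty := rfl
  rw [hempty, this, cbMapRed_values]
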